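-- pv_equiv track=rewrite | github.com/z83177265/nlp | demo.py | getAllIncomingPoints
-- ===== SOURCE A (Python) =====
-- max_length = 3 #词典最长词
--
-- def getAllIncomingPoints(point:int, string:str, dictionary:list):
--   results = []
--   end = point
--   start = 0
--   if end - max_length >= 0:
--     start = end - max_length
--
--   while start < end:
--     if string[start:end] in dict(dictionary):
--       results.append(start)
--     start += 1
--   return results
-- ===== SOURCE B (Python) =====
-- max_length = 3  # longest dictionary word
--
-- def getAllIncomingPoints(point, string, dictionary):
--     # Word-driven: each dictionary word can match at exactly one start position
--     # (the one whose distance from the clamped end equals the word's length),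
--     # so test each word once and sort the hits, instead of scanning positions.
--     lo = max(point - max_length, 0)
--     e = min(point, len(string))
--     starts = []
--     for k in dict(dictionary):
--         s = e - len(k)
--         if lo <= s < e and string[s:point] == k:
--             starts.append(s)
--     return sorted(starts)
-- ===== Notes on version B (the rewrite author's own statement) =====
-- stated objective: alternative
-- what changed: B iterates over the dictionary words instead of over start positions: each word of length L can only match at the single start e-L (e = clamped end), so B tests that one position per word and sorts the hits, replacing A's position scan with a per-iteration dict rebuild and membership test. Pre_ excludes only dictionaries with an empty-string key when point exceeds the string length, where A records past-the-end positions as matches of the empty word (a slice-clamping artefact) and B matches nothing.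
-- outside the precondition, e.g. on getAllIncomingPoints(3, 'ab', [('', 'x')]): A returns [2], B returns []
import Mathlib
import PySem

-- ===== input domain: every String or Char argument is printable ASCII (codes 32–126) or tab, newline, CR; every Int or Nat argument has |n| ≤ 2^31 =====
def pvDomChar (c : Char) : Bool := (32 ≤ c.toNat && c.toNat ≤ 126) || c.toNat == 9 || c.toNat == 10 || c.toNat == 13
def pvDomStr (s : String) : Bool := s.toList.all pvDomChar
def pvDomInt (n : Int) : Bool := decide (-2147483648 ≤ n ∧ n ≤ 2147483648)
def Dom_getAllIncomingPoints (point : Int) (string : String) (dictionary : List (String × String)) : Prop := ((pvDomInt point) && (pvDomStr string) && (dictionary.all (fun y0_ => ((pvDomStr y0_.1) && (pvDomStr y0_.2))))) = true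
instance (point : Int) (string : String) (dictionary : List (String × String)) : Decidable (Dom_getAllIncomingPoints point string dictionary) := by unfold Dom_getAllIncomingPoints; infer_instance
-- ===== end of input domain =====

-- B is word-driven: each dictionary word can match at exactly one start position
-- (the one whose distance from the clamped end equals the word's length), so B
-- tests each word once and sorts the hits, instead of A's scan over start
-- positions with a dict rebuild and membership test per position (alternative).

-- ===== PORT A =====
def gaipMaxLength : Int := 3   -- max_length = 3

-- the 'while start < end' loop; fuel = number of remaining iterations
def gaipLoopA (string : String) (dictionary : List (String × String)) (endI : Int) :
    Nat → Int → List Int → List Int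
  | 0, _, results => results
  | fuel + 1, start, results =>
    let results :=
      if (PySem.Dict.ofList dictionary).contains
          (PySem.Str.slice string (some start) (some endI)) then
        results ++ [start]
      else results
    gaipLoopA string dictionary endI fuel (start + 1) results

def getAllIncomingPoints (point : Int) (string : String) (dictionary : List (String × String)) : List Int :=
  let results : List Int := []
  let endI := point
  let start : Int := 0
  let start := if endI - gaipMaxLength ≥ 0 then endI - gaipMaxLength else start
  gaipLoopA string dictionary endI (endI - start).toNat start results

-- ===== PORT B =====
def getAllIncomingPoints_alt (point : Int) (string : String) (dictionary : List (String × String)) : List Int :=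
  let lo := max (point - gaipMaxLength) 0
  let e := min point (PySem.Str.len string)
  let starts := (PySem.Dict.ofList dictionary).keys.foldl
    (fun acc k =>
      if lo ≤ e - PySem.Str.len k ∧ e - PySem.Str.len k < e ∧
          PySem.Str.slice string (some (e - PySem.Str.len k)) (some point) = k
      then acc ++ [e - PySem.Str.len k] else acc) []
  PySem.List.sorted starts (fun x => x) false

-- ===== PRECONDITION & SPEC =====
-- Pre_ excludes only dictionaries containing the empty-string key combined with point
-- beyond the string length: there A's clamped slices become empty past the string end and
-- A records every such past-the-end position as a "match" of the empty word — an artefact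
-- of Python slice clamping; B never matches the empty word, both behaviours being defensible.
def Pre_getAllIncomingPoints (point : Int) (string : String) (dictionary : List (String × String)) : Prop :=
  (∀ p ∈ dictionary, p.1 ≠ "") ∨ point ≤ PySem.Str.len string
instance (point : Int) (string : String) (dictionary : List (String × String)) : Decidable (Pre_getAllIncomingPoints point string dictionary) := by unfold Pre_getAllIncomingPoints; infer_instance

def pvWitness_getAllIncomingPoints : Int × String × (List (String × String)) := (2, "ab", [("b", "x")])

def Spec_getAllIncomingPoints (point : Int) (string : String) (dictionary : List (String × String)) (out : List Int) : Prop := out = getAllIncomingPoints_alt point string dictionary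
instance (point : Int) (string : String) (dictionary : List (String × String)) (out : List Int) : Decidable (Spec_getAllIncomingPoints point string dictionary out) := by unfold Spec_getAllIncomingPoints; infer_instance

-- ===== CLAIM (what is proved, stated in full; the proofs are below) =====
def Claim_equal_getAllIncomingPoints : Prop := ∀ (point : Int) (string : String) (dictionary : List (String × String)), Dom_getAllIncomingPoints point string dictionary → Pre_getAllIncomingPoints point string dictionary → Spec_getAllIncomingPoints point string dictionary (getAllIncomingPoints point string dictionary)

-- ===== LEMMAS AND PROOFS =====

-- keys of dict(dictionary) are the distinct first components, in first-occurrence order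
lemma gaip_keys_eq (l : List (String × String)) :
    (PySem.Dict.ofList l).keys = PySem.Set.ofList (l.map (fun p => p.1)) := by
  show (PySem.Dict.empty.update l).keys = _
  unfold PySem.Dict.update
  rw [PySem.Dict.keys_foldl_insert_key l (fun p => p.1) (fun _ p => p.2)]
  simp [PySem.Dict.keys_empty, PySem.Set.update, PySem.Set.ofList_eq_foldl]

-- unrolling A's loop: it filters the fuel-many positions start, start+1, …
lemma gaip_loopA_eq (string : String) (dictionary : List (String × String)) (endI : Int) :
    ∀ (fuel : Nat) (start : Int) (acc : List Int),
      gaipLoopA string dictionary endI fuel start acc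
        = acc ++ (List.map (fun k : Nat => start + (k : Int)) (List.range fuel)).filter
            (fun s => (PySem.Dict.ofList dictionary).contains
              (PySem.Str.slice string (some s) (some endI))) := by
  intro fuel
  induction fuel with
  | zero => intro start acc; rw [gaipLoopA]; simp
  | succ n ih =>
    intro start acc
    rw [gaipLoopA]
    show gaipLoopA string dictionary endI n (start + 1)
        (if (PySem.Dict.ofList dictionary).contains
            (PySem.Str.slice string (some start) (some endI)) then acc ++ [start] else acc) = _
    rw [ih, List.range_succ_eq_map, List.map_cons, List.map_map]
    have hm : List.map ((fun k : Nat => start + (k : Int)) ∘ Nat.succ) (List.range n)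
        = List.map (fun k : Nat => (start + 1) + (k : Int)) (List.range n) := by
      apply List.map_congr_left; intro a _; simp [Function.comp]; ring
    rw [hm, List.filter_cons]
    by_cases hc : (PySem.Dict.ofList dictionary).contains
        (PySem.Str.slice string (some start) (some endI)) = true
    · simp [hc, List.append_assoc]
    · simp [hc]

-- A is the ascending positions lo..point-1 filtered by dictionary membership
lemma gaip_A_repr (point : Int) (string : String) (dictionary : List (String × String)) :
    getAllIncomingPoints point string dictionary
      = (PySem.List.pyRange (max (point - 3) 0) point 1).filter
          (fun s => (PySem.Dict.ofList dictionary).contains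
            (PySem.Str.slice string (some s) (some point))) := by
  simp only [getAllIncomingPoints, gaipMaxLength]
  have h : (if point - 3 ≥ 0 then point - 3 else (0:Int)) = max (point - 3) 0 := by
    split_ifs <;> omega
  rw [h, gaip_loopA_eq, List.nil_append, PySem.List.pyRange_one]

-- unrolling B's loop
lemma gaip_loopB_eq (f : String → Int) (p : String → Prop) [DecidablePred p] :
    ∀ (l : List String) (acc : List Int),
      l.foldl (fun acc k => if p k then acc ++ [f k] else acc) acc
        = acc ++ (l.filter (fun k => decide (p k))).map f := by
  intro l
  induction l with
  | nil => intro acc; simp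
  | cons x xs ih =>
    intro acc
    rw [List.foldl_cons, ih, List.filter_cons]
    by_cases hx : p x
    · simp [hx, List.append_assoc]
    · simp [hx]


-- length of string[x:point] for 0 ≤ x < point, with Python's clamping
lemma gaip_slice_len (string : String) (x point : Int) (h0 : 0 ≤ x) (hxp : x < point) :
    PySem.Str.len (PySem.Str.slice string (some x) (some point))
      = max 0 (min point (PySem.Str.len string) - x) := by
  rw [PySem.Str.len_eq, PySem.Str.toList_slice, PySem.Chars.slice_eq_listSlice,
      PySem.List.slice_toNat _ h0 (by omega), PySem.Str.len_eq]
  simp only [List.length_take, List.length_drop]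
  omega

theorem gaip_main (point : Int) (string : String) (dictionary : List (String × String))
    (hpre : (∀ p ∈ dictionary, p.1 ≠ "") ∨ point ≤ PySem.Str.len string) :
    getAllIncomingPoints point string dictionary
      = getAllIncomingPoints_alt point string dictionary := by
  rw [gaip_A_repr]
  simp only [getAllIncomingPoints_alt, gaipMaxLength]
  have hfold : List.foldl
        (fun acc k =>
          if max (point - 3) 0 ≤ min point (PySem.Str.len string) - PySem.Str.len k ∧
              min point (PySem.Str.len string) - PySem.Str.len k < min point (PySem.Str.len string) ∧
              PySem.Str.slice string
                (some (min point (PySem.Str.len string) - PySem.Str.len k)) (some point) = k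
          then acc ++ [min point (PySem.Str.len string) - PySem.Str.len k]
          else acc)
        [] (PySem.Dict.ofList dictionary).keys
      = (((PySem.Dict.ofList dictionary).keys).filter
          (fun k => decide (max (point - 3) 0 ≤ min point (PySem.Str.len string) - PySem.Str.len k ∧
              min point (PySem.Str.len string) - PySem.Str.len k < min point (PySem.Str.len string) ∧
              PySem.Str.slice string
                (some (min point (PySem.Str.len string) - PySem.Str.len k)) (some point) = k))).map
          (fun k => min point (PySem.Str.len string) - PySem.Str.len k) := by
    rw [gaip_loopB_eq (fun k => min point (PySem.Str.len string) - PySem.Str.len k)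
        (fun k => max (point - 3) 0 ≤ min point (PySem.Str.len string) - PySem.Str.len k ∧
          min point (PySem.Str.len string) - PySem.Str.len k < min point (PySem.Str.len string) ∧
          PySem.Str.slice string
            (some (min point (PySem.Str.len string) - PySem.Str.len k)) (some point) = k),
        List.nil_append]
  refine Eq.trans ?_
    (congrArg (fun l => PySem.List.sorted l (fun x : Int => x)) hfold.symm)
  set lo : Int := max (point - 3) 0 with hlo
  set e : Int := min point (PySem.Str.len string) with he
  have hlo0 : 0 ≤ lo := le_max_right _ _
  have heP : e ≤ point := min_le_left _ _
  have hknd : ((PySem.Dict.ofList dictionary).keys).Nodup := by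
    rw [gaip_keys_eq]; exact PySem.Set.nodup_ofList _
  have hQ : ∀ k ∈ ((PySem.Dict.ofList dictionary).keys).filter
      (fun k => decide (lo ≤ e - PySem.Str.len k ∧ e - PySem.Str.len k < e ∧
        PySem.Str.slice string (some (e - PySem.Str.len k)) (some point) = k)),
      lo ≤ e - PySem.Str.len k ∧ e - PySem.Str.len k < e ∧
        PySem.Str.slice string (some (e - PySem.Str.len k)) (some point) = k := by
    intro k hk
    exact of_decide_eq_true (List.mem_filter.mp hk).2
  symm
  apply PySem.List.sorted_eq_of_perm_of_pairwise_lt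
  · -- the ascending filtered range is a permutation of B's collected starts
    have hndA : ((PySem.List.pyRange lo point 1).filter
        (fun s => (PySem.Dict.ofList dictionary).contains
          (PySem.Str.slice string (some s) (some point)))).Nodup :=
      (PySem.List.nodup_pyRange_one lo point).filter _
    have hndB : ((((PySem.Dict.ofList dictionary).keys).filter
        (fun k => decide (lo ≤ e - PySem.Str.len k ∧ e - PySem.Str.len k < e ∧
          PySem.Str.slice string (some (e - PySem.Str.len k)) (some point) = k))).map
        (fun k => e - PySem.Str.len k)).Nodup := by
      apply List.Nodup.map_on _ (hknd.filter _)
      intro k1 h1 k2 h2 hf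
      obtain ⟨-, -, h31⟩ := hQ k1 h1
      obtain ⟨-, -, h32⟩ := hQ k2 h2
      rw [← h31, ← h32, hf]
    rw [List.perm_ext_iff_of_nodup hndA hndB]
    intro x
    constructor
    · intro hx
      rcases List.mem_filter.mp hx with ⟨hxr, hxc⟩
      obtain ⟨hxlo, hxpt⟩ := PySem.List.mem_pyRange_one.mp hxr
      have hx0 : 0 ≤ x := le_trans hlo0 hxlo
      have hkmem : PySem.Str.slice string (some x) (some point)
          ∈ (PySem.Dict.ofList dictionary).keys :=
        (PySem.Dict.contains_iff_mem_keys _ _).mp hxc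
      have hlen : PySem.Str.len (PySem.Str.slice string (some x) (some point))
          = max 0 (e - x) := by
        rw [gaip_slice_len string x point hx0 hxpt, he]
      have hxe : x < e := by
        rcases hpre with hne | hple
        · have hkne : PySem.Str.slice string (some x) (some point) ≠ "" := by
            have hmem2 : PySem.Str.slice string (some x) (some point)
                ∈ dictionary.map (fun p => p.1) := by
              rw [gaip_keys_eq, PySem.Set.mem_ofList] at hkmem; exact hkmem
            obtain ⟨p, hp, hpe⟩ := List.mem_map.mp hmem2
            exact hpe ▸ hne p hp
          by_contra hcon
          apply hkne
          have h0 : PySem.Str.len (PySem.Str.slice string (some x) (some point)) = 0 := by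
            rw [hlen]; omega
          rw [PySem.Str.len_eq] at h0
          rw [← String.toList_inj]
          simpa using h0
        · have hep : e = point := by rw [he]; omega
          omega
      have hlen' : PySem.Str.len (PySem.Str.slice string (some x) (some point)) = e - x := by
        rw [hlen]; omega
      apply List.mem_map.mpr
      refine ⟨PySem.Str.slice string (some x) (some point),
        List.mem_filter.mpr ⟨hkmem, decide_eq_true ?_⟩, by rw [hlen']; ring⟩
      rw [hlen']
      have hxx : e - (e - x) = x := by ring
      rw [hxx]
      exact ⟨hxlo, hxe, rfl⟩
    · intro hx
      obtain ⟨k, hkf, hfx⟩ := List.mem_map.mp hx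
      obtain ⟨h1, h2, h3⟩ := hQ k hkf
      have hkk := (List.mem_filter.mp hkf).1
      refine List.mem_filter.mpr ⟨PySem.List.mem_pyRange_one.mpr ⟨?_, ?_⟩, ?_⟩
      · omega
      · omega
      · rw [← hfx, PySem.Dict.contains_iff_mem_keys, h3]; exact hkk
  · exact (PySem.List.pairwise_lt_pyRange_one lo point).filter _

-- ===== VERDICT (by name: the statement is the Claim_ definition above) =====
theorem getAllIncomingPoints_spec : Claim_equal_getAllIncomingPoints := by
  intro point string dictionary _ hpre
  unfold Spec_getAllIncomingPoints
  exact gaip_main point string dictionary hpre
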